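-- pv_equiv track=rewrite | github.com/RagePly/aoc24 | day22.py | gensecret
-- ===== SOURCE A (Python) =====
-- def gensecret(sec,c):
--     for _ in range(c):
--         n = sec*64
--         sec = sec ^ n
--         sec %= 16777216
--         n = sec // 32
--         sec = sec ^ n
--         sec %= 16777216
--         n = sec * 2048
--         sec = sec ^ n
--         sec %= 16777216
--     return sec
-- ===== SOURCE B (Python) =====
-- def _step(s):
--     s = (s ^ (s * 64)) % 16777216
--     s = (s ^ (s // 32)) % 16777216
--     s = (s ^ (s * 2048)) % 16777216
--     return s
--
-- def _apply(m, v):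
--     r = 0
--     for i in range(24):
--         if (v >> i) & 1:
--             r ^= m[i]
--     return r
--
-- def _mul(a, b):
--     return [_apply(a, col) for col in b]
--
-- def _matpow(m, e):
--     r = [1 << i for i in range(24)]
--     while e:
--         if e & 1:
--             r = _mul(m, r)
--         m = _mul(m, m)
--         e >>= 1
--     return r
--
-- def gensecret(sec, c):
--     if c <= 0:
--         return sec
--     s = _step(sec)
--     m = _matpow([_step(1 << i) for i in range(24)], c - 1)
--     return _apply(m, s)
-- ===== Notes on version B (the rewrite author's own statement) =====
-- stated objective: faster
-- what changed: A iterates the PRNG step c times; B exploits that the step is GF(2)-linear on 24 bits and applies one literal step followed by exponentiation-by-squaring of the step's 24x24 bit-matrix, so the loop count drops from c to log2(c) matrix squarings.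
import Mathlib
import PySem

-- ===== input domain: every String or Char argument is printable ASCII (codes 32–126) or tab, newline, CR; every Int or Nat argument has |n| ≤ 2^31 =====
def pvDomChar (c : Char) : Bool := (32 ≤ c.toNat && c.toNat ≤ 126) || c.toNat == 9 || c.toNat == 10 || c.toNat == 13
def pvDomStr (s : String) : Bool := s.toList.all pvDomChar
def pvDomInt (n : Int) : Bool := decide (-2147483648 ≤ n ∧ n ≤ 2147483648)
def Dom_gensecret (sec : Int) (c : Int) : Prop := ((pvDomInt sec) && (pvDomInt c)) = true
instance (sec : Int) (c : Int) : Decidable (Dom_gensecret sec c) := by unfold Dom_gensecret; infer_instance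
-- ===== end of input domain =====

-- B replaces A's c-fold iteration of the GF(2)-linear PRNG step by one step followed by
-- exponentiation-by-squaring of the 24×24 bit-matrix of the step map (faster: O(log c) vs O(c) steps).

-- ===== PORT A =====
def gensecret (sec : Int) (c : Int) : Int :=
  (PySem.List.pyRange 0 c 1).foldl (fun s _ =>
    let n := s * 64
    let s := PySem.Int.bxor s n
    let s := PySem.Int.mod s 16777216
    let n := PySem.Int.floordiv s 32
    let s := PySem.Int.bxor s n
    let s := PySem.Int.mod s 16777216
    let n := s * 2048
    let s := PySem.Int.bxor s n
    PySem.Int.mod s 16777216) sec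

-- ===== PORT B =====
-- Source B's _step (one literal PRNG step)
def pyStepB (s : Int) : Int :=
  let s := PySem.Int.mod (PySem.Int.bxor s (s * 64)) 16777216
  let s := PySem.Int.mod (PySem.Int.bxor s (PySem.Int.floordiv s 32)) 16777216
  PySem.Int.mod (PySem.Int.bxor s (s * 2048)) 16777216

-- Source B's _apply: xor of the columns selected by the bits of v (all values here are < 2^24, hence Nat)
def applyB (m : List Nat) (v : Nat) : Nat :=
  (List.range 24).foldl (fun r i => if (v >>> i) &&& 1 = 1 then r ^^^ m.getD i 0 else r) 0

-- Source B's _mul: columns of a*b are a applied to the columns of b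
def mulB (a b : List Nat) : List Nat := b.map (applyB a)

-- Source B's _matpow while-loop (accumulator r, square m, halve e)
def matpowLoop (m r : List Nat) (e : Nat) : List Nat :=
  if e = 0 then r
  else matpowLoop (mulB m m) (if e &&& 1 = 1 then mulB m r else r) (e >>> 1)
  termination_by e
  decreasing_by
    rename_i h
    rw [Nat.shiftRight_one]
    omega

def matpowB (m : List Nat) (e : Nat) : List Nat :=
  matpowLoop m ((List.range 24).map (fun i => 1 <<< i)) e

def gensecret_alt (sec : Int) (c : Int) : Int :=
  if c ≤ 0 then sec
  else
    let s := pyStepB sec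
    let m := matpowB ((List.range 24).map (fun (i : Nat) => (pyStepB ((1:Int) <<< i)).toNat)) (c - 1).toNat
    ((applyB m s.toNat : Nat) : Int)

-- ===== PRECONDITION & SPEC =====
def Spec_gensecret (sec : Int) (c : Int) (out : Int) : Prop := out = gensecret_alt sec c
instance (sec : Int) (c : Int) (out : Int) : Decidable (Spec_gensecret sec c out) := by unfold Spec_gensecret; infer_instance

-- ===== CLAIM (what is proved, stated in full; the proofs are below) =====
def Claim_equal_gensecret : Prop := ∀ (sec : Int) (c : Int), Dom_gensecret sec c → Spec_gensecret sec c (gensecret sec c)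

-- ===== LEMMAS AND PROOFS =====

-- the PRNG step on Nat (proof-side model of one loop iteration of A / of Source B's _step)
def stepN (x : Nat) : Nat :=
  let a := (x ^^^ x * 64) % 16777216
  let b := (a ^^^ a / 32) % 16777216
  (b ^^^ b * 2048) % 16777216

lemma stepN_lt (x : Nat) : stepN x < 16777216 := Nat.mod_lt _ (by norm_num)

-- xor of a power of two with a smaller number is addition (disjoint bits)
lemma xor_two_pow_add (k w : Nat) (h : w < 2 ^ k) : 2 ^ k ^^^ w = 2 ^ k + w := by
  apply Nat.eq_of_testBit_eq
  intro i
  rcases lt_trichotomy i k with hi | rfl | hi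
  · simp [Nat.testBit_xor, Nat.ne_of_gt hi, Nat.testBit_two_pow_add_gt hi]
  · simp [Nat.testBit_xor, Nat.testBit_two_pow_add_eq, Nat.testBit_lt_two_pow h]
  · have h1 : 2 ^ k + w < 2 ^ i := by
      have h2 : 2 ^ (k + 1) ≤ 2 ^ i := Nat.pow_le_pow_right (by omega) (by omega)
      have h3 : 2 ^ (k + 1) = 2 ^ k + 2 ^ k := by ring
      omega
    simp [Nat.testBit_xor, Nat.ne_of_lt hi, Nat.testBit_lt_two_pow h1,
      Nat.testBit_lt_two_pow
        (lt_of_lt_of_le h (Nat.pow_le_pow_right (by omega) (by omega)) : w < 2 ^ i)]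

lemma mod24_eq_and (z : Nat) : z % 16777216 = z &&& 16777215 := by
  have h := Nat.and_two_pow_sub_one_eq_mod z 24
  norm_num at h
  omega

lemma stepN_linear (x y : Nat) : stepN (x ^^^ y) = stepN x ^^^ stepN y := by
  have hmul : ∀ (z : Nat) (k : Nat), z * (2 ^ k) = z <<< k := fun z k => (Nat.shiftLeft_eq z k).symm
  have h64 : ∀ z : Nat, z * 64 = z <<< 6 := fun z => hmul z 6
  have h2048 : ∀ z : Nat, z * 2048 = z <<< 11 := fun z => hmul z 11
  have hdiv : ∀ z : Nat, z / 32 = z >>> 5 := fun z => (Nat.shiftRight_eq_div_pow z 5).symm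
  simp only [stepN, mod24_eq_and, h64, h2048, hdiv,
    Nat.shiftLeft_xor_distrib, Nat.shiftRight_xor_distrib, Nat.and_xor_distrib_right]
  ac_rfl

lemma stepN_zero : stepN 0 = 0 := by decide

-- the if-condition of applyB is the testBit of v
lemma cond_iff (v i : Nat) : ((v >>> i) &&& 1 = 1) ↔ v.testBit i = true := by
  rw [Nat.and_one_is_mod, Nat.shiftRight_eq_div_pow, Nat.testBit_eq_decide_div_mod_eq]
  simp

-- applyB written as a xor-accumulating foldl of per-bit terms
def bitTerm (v : Nat) (m : List Nat) (i : Nat) : Nat := if v.testBit i then m.getD i 0 else 0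

def bigXor (v : Nat) (m : List Nat) (n : Nat) : Nat :=
  (List.range n).foldl (fun r i => r ^^^ bitTerm v m i) 0

lemma applyB_eq_bigXor (m : List Nat) (v : Nat) : applyB m v = bigXor v m 24 := by
  unfold applyB bigXor
  congr 1
  funext r i
  by_cases h : v.testBit i = true
  · rw [if_pos ((cond_iff v i).mpr h)]; simp [bitTerm, h]
  · rw [if_neg (fun hc => h ((cond_iff v i).mp hc))]
    simp [bitTerm, h]

lemma bigXor_succ (v : Nat) (m : List Nat) (n : Nat) :
    bigXor v m (n + 1) = bigXor v m n ^^^ bitTerm v m n := by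
  unfold bigXor
  rw [List.range_succ, List.foldl_append]
  simp

lemma bigXor_linear (x y : Nat) (m : List Nat) (n : Nat) :
    bigXor (x ^^^ y) m n = bigXor x m n ^^^ bigXor y m n := by
  induction n with
  | zero => simp [bigXor]
  | succ n ih =>
    have hterm : bitTerm (x ^^^ y) m n = bitTerm x m n ^^^ bitTerm y m n := by
      unfold bitTerm
      rw [Nat.testBit_xor]
      cases hx : x.testBit n <;> cases hy : y.testBit n <;> simp
    rw [bigXor_succ, bigXor_succ, bigXor_succ, ih, hterm]
    simp [Nat.xor_comm, Nat.xor_left_comm]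

lemma bigXor_zero_left (m : List Nat) (n : Nat) : bigXor 0 m n = 0 := by
  induction n with
  | zero => simp [bigXor]
  | succ n ih => rw [bigXor_succ, ih]; simp [bitTerm]

lemma bigXor_two_pow_of_ge (k n : Nat) (m : List Nat) (h : n ≤ k) : bigXor (2 ^ k) m n = 0 := by
  induction n with
  | zero => simp [bigXor]
  | succ n ih =>
    rw [bigXor_succ, ih (by omega)]
    simp only [bitTerm, Nat.testBit_two_pow]
    simp only [Nat.zero_xor]
    rw [if_neg (by simp; omega)]

lemma bigXor_two_pow (k n : Nat) (m : List Nat) (h : k < n) : bigXor (2 ^ k) m n = m.getD k 0 := by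
  induction n with
  | zero => omega
  | succ n ih =>
    rw [bigXor_succ]
    by_cases hk : k = n
    · subst hk
      rw [bigXor_two_pow_of_ge k k m le_rfl]
      simp [bitTerm]
    · rw [ih (by omega)]
      simp [bitTerm, hk]

lemma getD_lt (m : List Nat) (hm : ∀ x ∈ m, x < 2 ^ 24) (i : Nat) : m.getD i 0 < 2 ^ 24 := by
  by_cases h : i < m.length
  · rw [List.getD_eq_getElem m 0 h]; exact hm _ (List.getElem_mem h)
  · rw [List.getD_eq_default m 0 (by omega)]; norm_num

lemma bigXor_lt (v n : Nat) (m : List Nat) (hm : ∀ x ∈ m, x < 2 ^ 24) :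
    bigXor v m n < 2 ^ 24 := by
  induction n with
  | zero => simp [bigXor]
  | succ n ih =>
    rw [bigXor_succ]
    apply Nat.xor_lt_two_pow ih
    unfold bitTerm
    split
    · exact getD_lt m hm n
    · norm_num

-- applyB facts
lemma applyB_linear (m : List Nat) (x y : Nat) :
    applyB m (x ^^^ y) = applyB m x ^^^ applyB m y := by
  simp [applyB_eq_bigXor, bigXor_linear]

lemma applyB_zero (m : List Nat) : applyB m 0 = 0 := by
  simp [applyB_eq_bigXor, bigXor_zero_left]

lemma applyB_two_pow (m : List Nat) (i : Nat) (h : i < 24) : applyB m (2 ^ i) = m.getD i 0 := by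
  rw [applyB_eq_bigXor, bigXor_two_pow i 24 m h]

lemma applyB_lt (m : List Nat) (v : Nat) (hm : ∀ x ∈ m, x < 2 ^ 24) : applyB m v < 2 ^ 24 := by
  rw [applyB_eq_bigXor]; exact bigXor_lt v 24 m hm

-- basis extensionality for xor-linear maps on 24 bits
lemma linext (f g : Nat → Nat)
    (hf : ∀ a b, f (a ^^^ b) = f a ^^^ f b) (hf0 : f 0 = 0)
    (hg : ∀ a b, g (a ^^^ b) = g a ^^^ g b) (hg0 : g 0 = 0)
    (hb : ∀ i < 24, f (2 ^ i) = g (2 ^ i)) :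
    ∀ v < 2 ^ 24, f v = g v := by
  suffices h : ∀ k ≤ 24, ∀ v < 2 ^ k, f v = g v from h 24 le_rfl
  intro k
  induction k with
  | zero =>
    intro _ v hv
    interval_cases v
    rw [hf0, hg0]
  | succ k ih =>
    intro hk v hv
    by_cases hlow : v < 2 ^ k
    · exact ih (by omega) v hlow
    · have h2 : 2 ^ (k + 1) = 2 ^ k + 2 ^ k := by ring
      have hw : v - 2 ^ k < 2 ^ k := by omega
      have hsplit : v = 2 ^ k ^^^ (v - 2 ^ k) := by
        rw [xor_two_pow_add k _ hw]; omega
      rw [hsplit, hf _ _, hg _ _, hb k (by omega), ih (by omega) _ hw]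

-- a bit-matrix m represents a map f on the 24-bit domain
def ReprM (m : List Nat) (f : Nat → Nat) : Prop :=
  (∀ x ∈ m, x < 2 ^ 24) ∧ ∀ v < 2 ^ 24, applyB m v = f v

lemma repr_congr (m : List Nat) (f f' : Nat → Nat) (h : ReprM m f) (hff : ∀ v, f v = f' v) :
    ReprM m f' := ⟨h.1, fun v hv => (h.2 v hv).trans (hff v)⟩

lemma getD_map_eq (b : List Nat) (h : Nat → Nat) (i : Nat) (hi : i < b.length) :
    (b.map h).getD i 0 = h (b.getD i 0) := by
  rw [List.getD_eq_getElem _ 0 (by simpa using hi), List.getD_eq_getElem _ 0 hi,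
    List.getElem_map]

lemma repr_mul (a b : List Nat) (f g : Nat → Nat) (hb24 : b.length = 24)
    (ha : ReprM a f) (hbg : ReprM b g) : ReprM (mulB a b) (fun v => f (g v)) := by
  refine ⟨?_, ?_⟩
  · intro x hx
    obtain ⟨col, _, rfl⟩ := List.mem_map.mp hx
    exact applyB_lt a col ha.1
  · intro v hv
    have hmain : ∀ w < 2 ^ 24, applyB (mulB a b) w = applyB a (applyB b w) := by
      apply linext
      · exact applyB_linear _
      · exact applyB_zero _
      · intro x y; rw [applyB_linear b x y, applyB_linear a]
      · rw [applyB_zero b, applyB_zero a]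
      · intro i hi
        rw [applyB_two_pow _ i hi, applyB_two_pow _ i hi]
        unfold mulB
        rw [getD_map_eq b (applyB a) i (by omega)]
    rw [hmain v hv, hbg.2 v hv, ha.2 (g v) (by rw [← hbg.2 v hv]; exact applyB_lt b v hbg.1)]

lemma repr_id : ReprM ((List.range 24).map (fun i => 1 <<< i)) id := by
  constructor
  · intro x hx
    obtain ⟨i, hi, rfl⟩ := List.mem_map.mp hx
    rw [List.mem_range] at hi
    rw [Nat.shiftLeft_eq, one_mul]
    exact Nat.pow_lt_pow_right (by omega) hi
  · apply linext
    · exact applyB_linear _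
    · exact applyB_zero _
    · intro x y; rfl
    · rfl
    · intro i hi
      rw [applyB_two_pow _ i hi,
        getD_map_eq (List.range 24) (fun i => 1 <<< i) i (by simpa using hi)]
      have hr : (List.range 24).getD i 0 = i := by
        rw [List.getD_eq_getElem _ 0 (by simpa using hi)]; simp
      rw [hr, Nat.shiftLeft_eq]
      simp

-- Int/Nat bridge for one step
lemma pyStepB_natCast (x : Nat) : pyStepB (x : Int) = ((stepN x : Nat) : Int) := by
  have hmul64 : ∀ z : Nat, ((z:Int) * 64) = ((z * 64 : Nat) : Int) := by intro z; push_cast; ring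
  have hmul2048 : ∀ z : Nat, ((z:Int) * 2048) = ((z * 2048 : Nat) : Int) := by
    intro z; push_cast; ring
  have hmod : ∀ z : Nat, PySem.Int.mod (z:Int) 16777216 = ((z % 16777216 : Nat) : Int) := by
    intro z; exact_mod_cast PySem.Int.mod_natCast z 16777216
  have hdiv : ∀ z : Nat, PySem.Int.floordiv (z:Int) 32 = ((z / 32 : Nat) : Int) := by
    intro z; exact_mod_cast PySem.Int.floordiv_natCast z 32
  simp only [pyStepB, stepN, hmul64, hmul2048, PySem.Int.bxor_natCast, hmod, hdiv]

lemma pyStepB_nonneg (s : Int) : 0 ≤ pyStepB s := PySem.Int.mod_nonneg _ (by norm_num)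

lemma pyStepB_lt (s : Int) : pyStepB s < 16777216 := PySem.Int.mod_lt _ (by norm_num)

lemma one_shiftLeft_int (i : Nat) : ((1 : Int) <<< i) = ((1 <<< i : Nat) : Int) := rfl

def baseCols : List Nat := (List.range 24).map (fun (i : Nat) => (pyStepB ((1:Int) <<< i)).toNat)

lemma repr_base : ReprM baseCols stepN := by
  have hcol : ∀ i : Nat, (pyStepB ((1:Int) <<< i)).toNat = stepN (2 ^ i) := by
    intro i
    rw [one_shiftLeft_int, pyStepB_natCast]
    simp [Nat.shiftLeft_eq]
  constructor
  · intro x hx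
    obtain ⟨i, _, rfl⟩ := List.mem_map.mp hx
    rw [hcol i]
    have := stepN_lt (2 ^ i)
    norm_num
    omega
  · apply linext
    · exact applyB_linear _
    · exact applyB_zero _
    · exact stepN_linear
    · exact stepN_zero
    · intro i hi
      rw [applyB_two_pow _ i hi]
      unfold baseCols
      rw [getD_map_eq (List.range 24) _ i (by simpa using hi)]
      have hr : (List.range 24).getD i 0 = i := by
        rw [List.getD_eq_getElem _ 0 (by simpa using hi)]; simp
      rw [hr, hcol]

lemma mulB_length (a b : List Nat) : (mulB a b).length = b.length := by simp [mulB]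

lemma repr_matpowLoop : ∀ (e : Nat) (m r : List Nat) (j t : Nat), m.length = 24 → r.length = 24 →
    ReprM m (stepN^[j]) → ReprM r (stepN^[t]) → ReprM (matpowLoop m r e) (stepN^[e * j + t]) := by
  intro e
  induction e using Nat.strong_induction_on with
  | _ e ih =>
    intro m r j t hm24 hr24 hm hr
    rw [matpowLoop]
    by_cases he : e = 0
    · subst he; simpa using hr
    · rw [if_neg he]
      have hhalf : e >>> 1 < e := by rw [Nat.shiftRight_one]; omega
      have hmm : ReprM (mulB m m) (stepN^[j + j]) := by
        apply repr_congr _ _ _ (repr_mul m m _ _ hm24 hm hm)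
        intro v
        rw [Function.iterate_add_apply]
      have hbit : e &&& 1 = e % 2 := Nat.and_one_is_mod e
      by_cases hodd : e &&& 1 = 1
      · rw [if_pos hodd]
        have hmr : ReprM (mulB m r) (stepN^[j + t]) := by
          apply repr_congr _ _ _ (repr_mul m r _ _ hr24 hm hr)
          intro v
          rw [Function.iterate_add_apply]
        have := ih (e >>> 1) hhalf (mulB m m) (mulB m r) (j + j) (j + t)
          (by rw [mulB_length, hm24]) (by rw [mulB_length, hr24]) hmm hmr
        apply repr_congr _ _ _ this
        intro v
        congr 1
        rw [Nat.shiftRight_one]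
        have he2 : 2 * (e / 2) + 1 = e := by omega
        calc e / 2 * (j + j) + (j + t) = (2 * (e / 2) + 1) * j + t := by ring
          _ = e * j + t := by rw [he2]
      · rw [if_neg hodd]
        have := ih (e >>> 1) hhalf (mulB m m) r (j + j) t
          (by rw [mulB_length, hm24]) hr24 hmm hr
        apply repr_congr _ _ _ this
        intro v
        congr 1
        rw [Nat.shiftRight_one]
        have he2 : 2 * (e / 2) = e := by omega
        calc e / 2 * (j + j) + t = 2 * (e / 2) * j + t := by ring
          _ = e * j + t := by rw [he2]

-- A's loop is iteration of the step
lemma foldl_const_iterate (f : Int → Int) (l : List Int) (x : Int) :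
    l.foldl (fun s _ => f s) x = f^[l.length] x := by
  induction l generalizing x with
  | nil => simp
  | cons y ys ih => simp [ih, Function.iterate_succ_apply]

lemma iterate_natCast (k : Nat) (x : Nat) : pyStepB^[k] (x : Int) = ((stepN^[k] x : Nat) : Int) := by
  induction k generalizing x with
  | zero => simp
  | succ k ih => rw [Function.iterate_succ_apply, Function.iterate_succ_apply, pyStepB_natCast, ih]

lemma gensecret_eq_iterate (sec c : Int) : gensecret sec c = pyStepB^[c.toNat] sec := by
  have : gensecret sec c = (PySem.List.pyRange 0 c 1).foldl (fun s _ => pyStepB s) sec := rfl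
  rw [this, foldl_const_iterate, PySem.List.length_pyRange_one]
  norm_num

-- ===== VERDICT (by name: the statement is the Claim_ definition above) =====
theorem gensecret_spec : Claim_equal_gensecret := by
  intro sec c _
  unfold Spec_gensecret gensecret_alt
  by_cases hc : c ≤ 0
  · rw [if_pos hc, gensecret_eq_iterate]
    have : c.toNat = 0 := by omega
    rw [this]
    rfl
  · rw [if_neg hc]
    have hk : c.toNat = (c - 1).toNat + 1 := by omega
    set k := (c - 1).toNat with hkdef
    set s0 := (pyStepB sec).toNat with hs0
    have hsec : pyStepB sec = (s0 : Int) := (Int.toNat_of_nonneg (pyStepB_nonneg sec)).symm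
    have hlt : s0 < 2 ^ 24 := by
      have h1 := pyStepB_lt sec
      have h2 := pyStepB_nonneg sec
      omega
    rw [gensecret_eq_iterate, hk, Function.iterate_succ_apply, hsec, iterate_natCast]
    have hrepr := repr_matpowLoop k baseCols ((List.range 24).map (fun i => 1 <<< i)) 1 0
      (by simp [baseCols]) (by simp)
      (repr_congr _ _ _ repr_base (fun v => rfl))
      (repr_congr _ _ _ repr_id (fun v => rfl))
    have hval := hrepr.2 s0 hlt
    show ((stepN^[k] s0 : Nat) : Int) =
      ((applyB (matpowLoop baseCols ((List.range 24).map (fun i => 1 <<< i)) k) s0 : Nat) : Int)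
    rw [hval]
    congr 2
    omega
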